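-- pv_equiv track=rewrite | github.com/jflaboe/Project-Euler | Euler33.py | improper_reduce
-- ===== SOURCE A (Python) =====
-- def improper_reduce(num, den):
--     num = str(num)
--     den = str(den)
--     for i in range(0,len(num)):
--         if num[i] in den:
--             denpos = den.find(num[i])
--             den = den[0:denpos] + "*" +den[denpos+1:]
--             num = num[0:i] + "*"+num[i+1:]
--     try:
--
--         return (int(num.replace("*", '')), int(den.replace("*", '')))
--     except:
--         return (0,1)
-- ===== SOURCE B (Python) =====
-- def improper_reduce(num, den):
--     ns, ds = list(str(num)), list(str(den))
--
--     def kept(s, t):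
--         return ''.join(c for i, c in enumerate(s)
--                        if s[:i].count(c) >= min(s.count(c), t.count(c)))
--
--     try:
--         return (int(kept(ns, ds)), int(kept(ds, ns)))
--     except ValueError:
--         return (0, 1)
-- ===== Notes on version B (the rewrite author's own statement) =====
-- stated objective: simpler
-- what changed: Replaces A's sequential string mutation (star out num[i] and the first matching char of den, pass by pass) with a closed-form per-position rule: a character at position i is kept iff the number of equal characters before it already reaches min(count in num, count in den).
import Mathlib
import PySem

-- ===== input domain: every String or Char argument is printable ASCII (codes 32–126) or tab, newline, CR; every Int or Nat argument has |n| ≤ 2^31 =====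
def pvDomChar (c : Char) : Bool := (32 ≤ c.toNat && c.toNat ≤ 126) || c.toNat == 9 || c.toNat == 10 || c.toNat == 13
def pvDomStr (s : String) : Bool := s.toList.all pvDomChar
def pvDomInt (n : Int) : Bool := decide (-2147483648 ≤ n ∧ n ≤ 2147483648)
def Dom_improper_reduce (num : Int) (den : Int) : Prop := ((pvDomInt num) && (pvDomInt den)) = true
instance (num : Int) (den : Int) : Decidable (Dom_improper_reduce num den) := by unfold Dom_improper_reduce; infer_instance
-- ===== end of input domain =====

-- B replaces A's sequential star-out mutation of both strings with a closed-form per-position keep rule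
-- (keep a char iff the equal chars before it already reach min of the two counts); equal results, no speed claim.

-- ===== PORT A =====
-- body of A's loop 'for i in range(0, len(num))' over the state (num, den); num[i] is always in range
-- (the loop never changes the length of num), so pyGetD is exact here
def irStep (st : List Char × List Char) (i : Int) : List Char × List Char :=
  let c := PySem.List.pyGetD st.1 i ' '
  if PySem.Chars.isIn [c] st.2 then
    let denpos := PySem.Chars.find st.2 [c]
    (PySem.List.slice st.1 (some 0) (some i) ++ ['*'] ++ PySem.List.slice st.1 (some (i + 1)) none,
     PySem.List.slice st.2 (some 0) (some denpos) ++ ['*'] ++ PySem.List.slice st.2 (some (denpos + 1)) none)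
  else st

def improper_reduce (num : Int) (den : Int) : Int × Int :=
  let ns := PySem.Int.toChars num
  let ds := PySem.Int.toChars den
  let st := (PySem.List.pyRange 0 (ns.length : Int)).foldl irStep (ns, ds)
  -- try: return (int(num.replace("*", '')), int(den.replace("*", ''))) except: return (0, 1)
  match PySem.Int.ofChars? (PySem.Chars.replace st.1 ['*'] []) with
  | none => (0, 1)
  | some a =>
    match PySem.Int.ofChars? (PySem.Chars.replace st.2 ['*'] []) with
    | none => (0, 1)
    | some b => (a, b)

-- ===== PORT B =====
-- ''.join(c for i, c in enumerate(s) if s[:i].count(c) >= min(s.count(c), t.count(c)))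
def irKept (s t : List Char) : List Char :=
  ((PySem.List.enumerate s).filter (fun ic =>
      min (s.count ic.2) (t.count ic.2) ≤ (PySem.List.slice s none (some ic.1)).count ic.2)).map (·.2)

def improper_reduce_alt (num : Int) (den : Int) : Int × Int :=
  let ns := PySem.Int.toChars num
  let ds := PySem.Int.toChars den
  -- try: return (int(kept(ns, ds)), int(kept(ds, ns))) except ValueError: return (0, 1)
  match PySem.Int.ofChars? (irKept ns ds) with
  | none => (0, 1)
  | some a =>
    match PySem.Int.ofChars? (irKept ds ns) with
    | none => (0, 1)
    | some b => (a, b)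

-- ===== PRECONDITION & SPEC =====
def Spec_improper_reduce (num : Int) (den : Int) (out : Int × Int) : Prop := out = improper_reduce_alt num den
instance (num : Int) (den : Int) (out : Int × Int) : Decidable (Spec_improper_reduce num den out) := by unfold Spec_improper_reduce; infer_instance

-- ===== CLAIM (what is proved, stated in full; the proofs are below) =====
def Claim_equal_improper_reduce : Prop := ∀ (num : Int) (den : Int), Dom_improper_reduce num den → Spec_improper_reduce num den (improper_reduce num den)

-- ===== LEMMAS AND PROOFS =====

def irDec (b : Char → Nat) (c : Char) : Char → Nat := fun x => if x = c then b x - 1 else b x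
def irBump (b : Char → Nat) (c : Char) : Char → Nat := fun x => if x = c then b x + 1 else b x
def irMask (b : Char → Nat) : List Char → List Char
  | [] => []
  | c :: t => if 0 < b c then '*' :: irMask (irDec b c) t else c :: irMask b t

theorem irMask_funext (b b' : Char → Nat) (l : List Char) (h : ∀ c, b c = b' c) :
    irMask b l = irMask b' l := by
  have : b = b' := funext h
  rw [this]

theorem irMask_append (b : Char → Nat) (xs ys : List Char) :
    irMask b (xs ++ ys) = irMask b xs ++ irMask (fun c => b c - xs.count c) ys := by
  induction xs generalizing b with
  | nil => simp [irMask]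
  | cons c t ih =>
    simp only [List.cons_append, irMask]
    split
    · rw [ih]
      rw [show (fun c_1 => irDec b c c_1 - List.count c_1 t) = (fun x => b x - List.count x (c :: t)) from funext (fun x => by
        by_cases hx : x = c
        · subst hx; simp [irDec, List.count_cons_self]; omega
        · simp [irDec, hx, Ne.symm hx])]
      simp
    · rename_i h
      rw [ih]
      rw [show (fun c_1 => b c_1 - List.count c_1 t) = (fun x => b x - List.count x (c :: t)) from funext (fun x => by
        by_cases hx : x = c
        · subst hx; simp [List.count_cons_self]; omega
        · simp [Ne.symm hx])]
      simp [List.cons_append]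

theorem mem_irMask (b : Char → Nat) (l : List Char) (c : Char) (hc : c ≠ '*') (hl : '*' ∉ l) :
    c ∈ irMask b l ↔ b c < l.count c := by
  induction l generalizing b with
  | nil => simp [irMask]
  | cons x t ih =>
    simp only [List.mem_cons, not_or] at hl
    simp only [irMask, List.count_cons]
    split
    · rw [List.mem_cons]
      simp only [hc, false_or]
      rw [ih _ hl.2]
      by_cases hx : c = x
      · simp [irDec, hx]; rename_i h; subst hx; omega
      · simp [irDec, hx, beq_iff_eq, Ne.symm hx]
    · rename_i h
      rw [List.mem_cons, ih _ hl.2]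
      by_cases hx : c = x
      · subst hx; simp; omega
      · simp [hx, beq_iff_eq, Ne.symm hx]

theorem irMask_congr (b b' : Char → Nat) (l : List Char)
    (h : ∀ c, min (b c) (l.count c) = min (b' c) (l.count c)) : irMask b l = irMask b' l := by
  induction l generalizing b b' with
  | nil => rfl
  | cons x t ih =>
    have hx := h x
    simp [List.count_cons_self] at hx
    have hb : 0 < b x ↔ 0 < b' x := by omega
    simp only [irMask]
    by_cases h0 : 0 < b x
    · rw [if_pos h0, if_pos (hb.mp h0)]
      congr 1
      apply ih
      intro c
      have := h c
      by_cases hcx : c = x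
      · subst hcx; simp [irDec, List.count_cons_self] at *; omega
      · have h2 : List.count c (x :: t) = List.count c t := by simp [Ne.symm hcx]
        rw [h2] at this; simpa [irDec, hcx] using this
    · rw [if_neg h0, if_neg (fun hh => h0 (hb.mpr hh))]
      congr 1
      apply ih
      intro c
      have := h c
      by_cases hcx : c = x
      · subst hcx; simp [List.count_cons_self] at *; omega
      · have h2 : List.count c (x :: t) = List.count c t := by simp [Ne.symm hcx]
        rw [h2] at this; exact this

theorem irMask_star_first (b : Char → Nat) (l : List Char) (c : Char) (hc : c ≠ '*') (hl : '*' ∉ l)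
    (h : b c < l.count c) :
    (irMask b l).take ((irMask b l).idxOf c) ++ '*' :: (irMask b l).drop ((irMask b l).idxOf c + 1)
      = irMask (irBump b c) l := by
  induction l generalizing b with
  | nil => simp at h
  | cons x t ih =>
    simp only [List.mem_cons, not_or] at hl
    have hxs : x ≠ '*' := fun hh => hl.1 hh.symm
    simp only [irMask]
    by_cases h0 : 0 < b x
    · rw [if_pos h0]
      have h0' : 0 < irBump b c x := by simp [irBump]; split <;> omega
      rw [if_pos h0']
      have hcs : ('*' :: irMask (irDec b x) t).idxOf c = (irMask (irDec b x) t).idxOf c + 1 := by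
        rw [List.idxOf_cons_ne _ (Ne.symm hc)]
      rw [hcs]
      simp only [List.take_succ_cons, List.drop_succ_cons, List.cons_append]
      have hrec : irDec b x c < t.count c := by
        by_cases hxc : x = c
        · subst hxc; simp [List.count_cons_self] at h; simp [irDec]; omega
        · have : List.count c (x :: t) = List.count c t := by simp [hxc]
          rw [this] at h; simpa [irDec, Ne.symm hxc] using h
      rw [ih (irDec b x) hl.2 hrec]
      congr 1
      apply irMask_funext
      intro y
      by_cases hyc : y = c
      · subst hyc
        by_cases hyx : y = x
        · subst hyx; simp [irBump, irDec]; omega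
        · simp [irBump, irDec, hyx]
      · by_cases hyx : y = x
        · subst hyx; simp [irBump, irDec, hyc]
        · simp [irBump, irDec, hyc, hyx]
    · rw [if_neg h0]
      have h0' : ¬ 0 < irBump b c x ∨ x = c := by
        by_cases hxc : x = c
        · right; exact hxc
        · left; simpa [irBump, hxc] using h0
      by_cases hxc : x = c
      · subst hxc
        have hb0 : b x = 0 := by omega
        rw [List.idxOf_cons_self]
        have : 0 < irBump b x x := by simp [irBump]
        rw [if_pos this]
        simp only [List.take_zero, List.nil_append]
        congr 1
        apply irMask_funext
        intro y
        simp only [irBump, irDec]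
        by_cases hyx : y = x <;> simp [hyx, hb0]
      · have h0'' : ¬ 0 < irBump b c x := by simpa [irBump, hxc] using h0
        rw [if_neg h0'']
        rw [List.idxOf_cons_ne _ (Ne.symm (fun hh => hxc hh.symm))]
        simp only [List.take_succ_cons, List.drop_succ_cons, List.cons_append]
        have hrec : b c < t.count c := by
          have : List.count c (x :: t) = List.count c t := by simp [hxc]
          rwa [this] at h
        rw [ih b hl.2 hrec]

def irKeep (b : Char → Nat) : List Char → List Char
  | [] => []
  | c :: t => if 0 < b c then irKeep (irDec b c) t else c :: irKeep b t

theorem irKeep_funext (b b' : Char → Nat) (l : List Char) (h : ∀ c, b c = b' c) :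
    irKeep b l = irKeep b' l := by
  have : b = b' := funext h
  rw [this]

theorem filter_irMask (b : Char → Nat) (l : List Char) (hl : '*' ∉ l) :
    (irMask b l).filter (· ≠ '*') = irKeep b l := by
  induction l generalizing b with
  | nil => rfl
  | cons x t ih =>
    simp only [List.mem_cons, not_or] at hl
    simp only [irMask, irKeep]
    split
    · rw [List.filter_cons_of_neg (by simp)]
      exact ih _ hl.2
    · rw [List.filter_cons_of_pos (by simp; exact fun hh => hl.1 hh.symm)]
      rw [ih _ hl.2]

theorem replace_star_filter (l : List Char) : PySem.Chars.replace l ['*'] [] = l.filter (· ≠ '*') := by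
  have go : ∀ (fuel : Nat) (s acc : List Char), s.length ≤ fuel →
      PySem.Chars.replace.go ['*'] [] fuel s acc = acc.reverse ++ s.filter (· ≠ '*') := by
    intro fuel
    induction fuel with
    | zero =>
      intro s acc h
      have hs : s = [] := by rw [← List.length_eq_zero_iff]; omega
      subst hs; simp [PySem.Chars.replace.go]
    | succ n ih =>
      intro s acc h
      match s with
      | [] => simp [PySem.Chars.replace.go]
      | c :: t =>
        simp only [PySem.Chars.replace.go]
        by_cases hc : c = '*'
        · subst hc
          rw [if_pos (by simp [List.isPrefixOf])]
          simp only [List.length_cons] at h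
          rw [ih _ _ (by simp; omega)]
          simp
        · rw [if_neg (by simp [List.isPrefixOf, Ne.symm hc])]
          simp only [List.length_cons] at h
          rw [ih _ _ (by omega)]
          simp [hc]
  unfold PySem.Chars.replace
  rw [if_neg (by simp)]
  rw [go _ _ _ (le_refl _)]
  simp

theorem idxOf_le_of_getElem' (s : List Char) (c : Char) (j : Nat) (h : j < s.length) (hc : s[j] = c) :
    s.idxOf c ≤ j := by
  induction s generalizing j with
  | nil => simp at h
  | cons x t ih =>
    cases j with
    | zero => simp at hc; subst hc; simp [List.idxOf_cons_self]
    | succ j =>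
      by_cases hx : x = c
      · subst hx; simp [List.idxOf_cons_self]
      · rw [List.idxOf_cons_ne _ hx]
        have := ih j (by simpa using h) (by simpa using hc)
        omega

theorem find_singleton_eq_idxOf (s : List Char) (c : Char) (h : c ∈ s) :
    PySem.Chars.find s [c] = (s.idxOf c : Int) := by
  have hinf : [c] <:+: s := (List.singleton_infix_iff _ _).mpr h
  have hnn : 0 ≤ PySem.Chars.find s [c] := (PySem.Chars.find_nonneg_iff _ _).mpr hinf
  obtain ⟨hpre, hmin⟩ := PySem.Chars.find_spec hnn
  set j := (PySem.Chars.find s [c]).toNat with hj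
  obtain ⟨tl, htl⟩ := hpre
  simp only [List.singleton_append] at htl
  replace htl := htl.symm
  have hjlt : j < s.length := by
    have : (s.drop j).length = s.length - j := List.length_drop ..
    rw [htl] at this
    simp at this
    omega
  have hsj : s[j] = c := by
    have h0 : (s.drop j)[0]'(by rw [htl]; simp) = s[j]'(by omega) := by
      rw [List.getElem_drop]
      simp
    rw [List.getElem_of_eq htl] at h0
    simpa using h0.symm
  have hle : s.idxOf c ≤ j := idxOf_le_of_getElem' s c j hjlt hsj
  have hge : j ≤ s.idxOf c := by
    by_contra hlt
    rw [not_le] at hlt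
    apply hmin (s.idxOf c) hlt
    have hi : s.idxOf c < s.length := List.idxOf_lt_length_of_mem h
    have : s.drop (s.idxOf c) = c :: s.drop (s.idxOf c + 1) := by
      rw [List.drop_eq_getElem_cons hi, List.getElem_idxOf hi]
    rw [this]
    exact ⟨_, rfl⟩
  have : j = s.idxOf c := le_antisymm hge hle
  omega

theorem length_irMask (b : Char → Nat) (l : List Char) : (irMask b l).length = l.length := by
  induction l generalizing b with
  | nil => rfl
  | cons c t ih => simp only [irMask]; split <;> simp [ih]

theorem irStep_inv (ns ds : List Char) (hn : '*' ∉ ns) (hd : '*' ∉ ds) (i : Nat) (hi : i < ns.length) :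
    irStep (irMask (fun c => ds.count c) (ns.take i) ++ ns.drop i, irMask (fun c => (ns.take i).count c) ds) (i : Int)
      = (irMask (fun c => ds.count c) (ns.take (i + 1)) ++ ns.drop (i + 1),
         irMask (fun c => (ns.take (i + 1)).count c) ds) := by
  have hlen : (irMask (fun c => ds.count c) (ns.take i)).length = i := by
    rw [length_irMask, List.length_take]; omega
  have hdropc : ns.drop i = ns[i] :: ns.drop (i + 1) := List.drop_eq_getElem_cons hi
  have htakes : ns.take (i + 1) = ns.take i ++ [ns[i]] := by
    rw [List.take_add_one]
    simp [List.getElem?_eq_getElem hi]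
  have hc : PySem.List.pyGetD (irMask (fun c => ds.count c) (ns.take i) ++ ns.drop i) (i : Int) ' ' = ns[i] := by
    rw [PySem.List.pyGetD_natCast]
    rw [List.getD_eq_getElem?_getD]
    rw [List.getElem?_append_right (by omega)]
    rw [hlen]
    rw [Nat.sub_self, hdropc]
    rfl
  have hcs : ns[i] ≠ '*' := fun hh => hn (hh ▸ List.getElem_mem hi)
  simp only [irStep, hc]
  by_cases hmem : ns[i] ∈ irMask (fun c => (ns.take i).count c) ds
  · rw [if_pos (by rw [PySem.Chars.isIn_iff_infix]; exact (List.singleton_infix_iff _ _).mpr hmem)]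
    have hcnt : (ns.take i).count ns[i] < ds.count ns[i] :=
      (mem_irMask _ _ _ hcs hd).mp hmem
    have hnum : PySem.List.slice (irMask (fun c => ds.count c) (ns.take i) ++ ns.drop i) (some 0) (some (i : Int)) ++ ['*'] ++
        PySem.List.slice (irMask (fun c => ds.count c) (ns.take i) ++ ns.drop i) (some ((i : Int) + 1)) none
        = irMask (fun c => ds.count c) (ns.take (i + 1)) ++ ns.drop (i + 1) := by
      set A := irMask (fun c => ds.count c) (ns.take i) ++ ns.drop i with hA
      have hs1 : PySem.List.slice A (some 0) (some (i : Int)) = irMask (fun c => ds.count c) (ns.take i) := by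
        have := PySem.List.slice_natCast A 0 i
        simp only [Nat.cast_zero] at this
        rw [this, Nat.sub_zero, List.drop_zero, hA]
        exact List.take_left' hlen
      have hs2 : PySem.List.slice A (some ((i : Int) + 1)) none = ns.drop (i + 1) := by
        rw [PySem.List.slice_from A (by omega)]
        have h2 : ((i : Int) + 1).toNat = i + 1 := by omega
        rw [h2, hA, List.drop_append]
        rw [List.drop_eq_nil_of_le (by rw [hlen]; omega), hlen, hdropc]
        simp
      rw [hs1, hs2, htakes, irMask_append]
      have h1 : irMask (fun c => ds.count c - (ns.take i).count c) [ns[i]] = ['*'] := by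
        simp only [irMask]
        rw [if_pos (by omega)]
      rw [h1]
    have hden : PySem.List.slice (irMask (fun c => (ns.take i).count c) ds) (some 0)
          (some (PySem.Chars.find (irMask (fun c => (ns.take i).count c) ds) [ns[i]])) ++ ['*'] ++
        PySem.List.slice (irMask (fun c => (ns.take i).count c) ds)
          (some (PySem.Chars.find (irMask (fun c => (ns.take i).count c) ds) [ns[i]] + 1)) none
        = irMask (fun c => (ns.take (i + 1)).count c) ds := by
      set D := irMask (fun c => (ns.take i).count c) ds with hD
      have hf : PySem.Chars.find D [ns[i]] = (D.idxOf ns[i] : Int) := find_singleton_eq_idxOf D ns[i] hmem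
      have hs1 : PySem.List.slice D (some 0) (some (D.idxOf ns[i] : Int)) = D.take (D.idxOf ns[i]) := by
        have := PySem.List.slice_natCast D 0 (D.idxOf ns[i])
        simp only [Nat.cast_zero] at this
        rw [this, Nat.sub_zero, List.drop_zero]
      have hs2 : PySem.List.slice D (some ((D.idxOf ns[i] : Int) + 1)) none = D.drop (D.idxOf ns[i] + 1) := by
        rw [PySem.List.slice_from D (by omega)]
        have h2 : ((D.idxOf ns[i] : Int) + 1).toNat = D.idxOf ns[i] + 1 := by omega
        rw [h2]
      rw [hf, hs1, hs2]
      have hstar := irMask_star_first (fun c => (ns.take i).count c) ds ns[i] hcs hd hcnt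
      rw [← hD] at hstar
      have : D.take (D.idxOf ns[i]) ++ ['*'] ++ D.drop (D.idxOf ns[i] + 1)
          = D.take (D.idxOf ns[i]) ++ '*' :: D.drop (D.idxOf ns[i] + 1) := by simp
      rw [this, hstar]
      apply irMask_funext
      intro y
      simp only [irBump]
      by_cases hy : y = ns[i]
      · subst hy
        rw [htakes, List.count_append, List.count_singleton]
        simp
      · rw [htakes, List.count_append, List.count_singleton]
        rw [if_neg hy]
        have : (ns[i] == y) = false := by simp; exact fun hh => hy hh.symm
        rw [this]
        simp
    rw [Prod.mk.injEq]
    exact ⟨hnum, hden⟩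
  · rw [if_neg (by rw [PySem.Chars.isIn_iff_infix]
                   exact fun hh => hmem ((List.singleton_infix_iff _ _).mp hh))]
    have hcnt : ¬ (ns.take i).count ns[i] < ds.count ns[i] :=
      fun hh => hmem ((mem_irMask _ _ _ hcs hd).mpr hh)
    have hnum : irMask (fun c => ds.count c) (ns.take i) ++ ns.drop i
        = irMask (fun c => ds.count c) (ns.take (i + 1)) ++ ns.drop (i + 1) := by
      rw [htakes, irMask_append]
      have h1 : irMask (fun c => ds.count c - (ns.take i).count c) [ns[i]] = [ns[i]] := by
        simp only [irMask]
        rw [if_neg (by omega)]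
      rw [h1, hdropc]
      simp
    have hden : irMask (fun c => (ns.take i).count c) ds = irMask (fun c => (ns.take (i + 1)).count c) ds := by
      apply irMask_congr
      intro c
      by_cases hcx : c = ns[i]
      · subst hcx
        rw [htakes]
        rw [List.count_append]
        simp
        omega
      · rw [htakes, List.count_append]
        have hb : List.count c [ns[i]] = 0 := by
          simp [List.count_singleton]
          exact fun hh => hcx hh.symm
        rw [hb]
        simp
    rw [Prod.mk.injEq]
    exact ⟨hnum, hden⟩

theorem ir_loop_inv (ns ds : List Char) (hn : '*' ∉ ns) (hd : '*' ∉ ds) :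
    ∀ (m i : Nat), i ≤ ns.length → ns.length - i = m →
      (PySem.List.pyRange (i : Int) (ns.length : Int)).foldl irStep
          (irMask (fun c => ds.count c) (ns.take i) ++ ns.drop i, irMask (fun c => (ns.take i).count c) ds)
        = (irMask (fun c => ds.count c) ns, irMask (fun c => ns.count c) ds) := by
  intro m
  induction m with
  | zero =>
    intro i hi hm
    have : i = ns.length := by omega
    subst this
    have hr : PySem.List.pyRange (ns.length : Int) (ns.length : Int) 1 = [] := by
      simp [PySem.List.pyRange]
    rw [hr]
    simp [List.take_of_length_le (le_refl _), List.drop_of_length_le (le_refl _)]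
  | succ m ih =>
    intro i hi hm
    have hlt : i < ns.length := by omega
    rw [PySem.List.pyRange_one_cons (by exact_mod_cast hlt)]
    rw [List.foldl_cons]
    rw [irStep_inv ns ds hn hd i hlt]
    have hcast : (i : Int) + 1 = ((i + 1 : Nat) : Int) := by push_cast; ring
    rw [hcast]
    exact ih (i + 1) (by omega) (by omega)

theorem toChars_no_star (n : Int) : '*' ∉ PySem.Int.toChars n := by
  have hdig : ∀ m : Nat, m < 10 → Nat.digitChar m ≠ '*' := by
    intro m hm
    interval_cases m <;> decide
  have hcore : ∀ (fuel n : Nat) (acc : List Char), '*' ∉ acc → '*' ∉ Nat.toDigitsCore 10 fuel n acc := by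
    intro fuel
    induction fuel with
    | zero => intro n acc hacc; simpa [Nat.toDigitsCore] using hacc
    | succ f ih =>
      intro n acc hacc
      simp only [Nat.toDigitsCore]
      have hh : '*' ∉ (n % 10).digitChar :: acc := by
        simp only [List.mem_cons, not_or]
        exact ⟨fun hc => hdig (n % 10) (Nat.mod_lt _ (by norm_num)) hc.symm, hacc⟩
      split
      · exact hh
      · exact ih _ _ hh
  unfold PySem.Int.toChars
  split
  · simp only [List.mem_cons, not_or]
    exact ⟨by decide, hcore _ _ _ (by simp)⟩
  · exact hcore _ _ _ (by simp)

theorem enumerate_cons (x : Char) (t : List Char) (k : Int) :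
    PySem.List.enumerate (x :: t) k = (k, x) :: PySem.List.enumerate t (k + 1) := by
  simp [PySem.List.enumerate]

theorem mem_enumerate_nonneg (s : List Char) (k : Int) (hk : 0 ≤ k) :
    ∀ ic ∈ PySem.List.enumerate s k, 0 ≤ ic.1 := by
  induction s generalizing k with
  | nil => intro ic h; simp [PySem.List.enumerate] at h
  | cons x t ih =>
    intro ic h
    rw [enumerate_cons] at h
    rcases List.mem_cons.mp h with h1 | h2
    · subst h1; exact hk
    · exact ih (k + 1) (by omega) ic h2

theorem irKeep_eq_kept (l : List Char) (B : Char → Nat) (pre : List Char) :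
    irKeep (fun c => B c - pre.count c) l
      = ((PySem.List.enumerate l (pre.length : Int)).filter (fun ic =>
          min (B ic.2) ((pre ++ l).count ic.2) ≤ ((pre ++ l).take ic.1.toNat).count ic.2)).map (·.2) := by
  induction l generalizing pre with
  | nil => simp [irKeep, PySem.List.enumerate]
  | cons x t ih =>
    rw [enumerate_cons, List.filter_cons]
    have htk : ((pre ++ x :: t).take ((pre.length : Int)).toNat) = pre := by
      rw [Int.toNat_natCast]
      exact List.take_left' rfl
    have hcnt : (pre ++ x :: t).count x = pre.count x + t.count x + 1 := by
      rw [List.count_append, List.count_cons_self]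
      ring
    have hcond : (min (B x) ((pre ++ x :: t).count x) ≤ ((pre ++ x :: t).take ((pre.length : Int)).toNat).count x)
        ↔ B x ≤ pre.count x := by
      rw [htk, hcnt]
      omega
    have happ : pre ++ x :: t = (pre ++ [x]) ++ t := by simp
    have hlen1 : (pre.length : Int) + 1 = ((pre ++ [x]).length : Int) := by
      simp
    have htail : (PySem.List.enumerate t ((pre.length : Int) + 1)).filter (fun ic =>
          min (B ic.2) ((pre ++ x :: t).count ic.2) ≤ ((pre ++ x :: t).take ic.1.toNat).count ic.2)
        = (PySem.List.enumerate t (((pre ++ [x]).length : Int))).filter (fun ic =>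
          min (B ic.2) (((pre ++ [x]) ++ t).count ic.2) ≤ (((pre ++ [x]) ++ t).take ic.1.toNat).count ic.2) := by
      rw [← hlen1, ← happ]
    simp only [irKeep]
    by_cases hb : 0 < B x - pre.count x
    · rw [if_pos hb]
      have : ¬ (min (B x) ((pre ++ x :: t).count x) ≤ ((pre ++ x :: t).take ((pre.length : Int)).toNat).count x) := by
        rw [hcond]; omega
      rw [if_neg (by simpa using this)]
      have hfe : irKeep (irDec (fun c => B c - pre.count c) x) t = irKeep (fun c => B c - (pre ++ [x]).count c) t := by
        apply irKeep_funext
        intro y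
        simp only [irDec, List.count_append, List.count_singleton]
        by_cases hy : y = x
        · subst hy; simp; omega
        · have hb2 : (x == y) = false := by simp; exact fun hh => hy hh.symm
          simp [hy, hb2]
      rw [hfe, htail, ih (pre ++ [x])]
    · rw [if_neg hb]
      have : (min (B x) ((pre ++ x :: t).count x) ≤ ((pre ++ x :: t).take ((pre.length : Int)).toNat).count x) := by
        rw [hcond]; omega
      rw [if_pos (by simpa using this)]
      rw [List.map_cons]
      congr 1
      have hfe : irKeep (fun c => B c - pre.count c) t = irKeep (fun c => B c - (pre ++ [x]).count c) t := by
        apply irKeep_funext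
        intro y
        simp only [List.count_append, List.count_singleton]
        by_cases hy : y = x
        · subst hy; simp; omega
        · have hb2 : (x == y) = false := by simp; exact fun hh => hy hh.symm
          simp [hb2]
      rw [hfe, htail, ih (pre ++ [x])]

theorem irKept_eq_irKeep (s t : List Char) : irKept s t = irKeep (fun c => t.count c) s := by
  unfold irKept
  have hflt : (PySem.List.enumerate s 0).filter (fun ic =>
        min (s.count ic.2) (t.count ic.2) ≤ (PySem.List.slice s none (some ic.1)).count ic.2)
      = (PySem.List.enumerate s 0).filter (fun ic =>
        min (t.count ic.2) (s.count ic.2) ≤ (s.take ic.1.toNat).count ic.2) := by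
    apply List.filter_congr
    intro ic hic
    have h0 : 0 ≤ ic.1 := mem_enumerate_nonneg s 0 (le_refl _) ic hic
    rw [PySem.List.slice_to s h0]
    rw [Nat.min_comm]
  rw [hflt]
  have := irKeep_eq_kept s (fun c => t.count c) []
  simp only [List.length_nil, Nat.cast_zero, List.nil_append, List.count_nil, Nat.sub_zero] at this
  exact this.symm

theorem irMask_zero (l : List Char) : irMask (fun _ => 0) l = l := by
  induction l with
  | nil => rfl
  | cons x t ih => simp [irMask, ih]

theorem ir_main (ns ds : List Char) (hn : '*' ∉ ns) (hd : '*' ∉ ds) :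
    ((PySem.List.pyRange 0 (ns.length : Int)).foldl irStep (ns, ds)).1.filter (· ≠ '*') = irKept ns ds
    ∧ ((PySem.List.pyRange 0 (ns.length : Int)).foldl irStep (ns, ds)).2.filter (· ≠ '*') = irKept ds ns := by
  have h0 := ir_loop_inv ns ds hn hd ns.length 0 (by omega) (by omega)
  simp only [List.take_zero, List.drop_zero, Nat.cast_zero] at h0
  have hz1 : irMask (fun c => List.count c ds) ([] : List Char) = [] := rfl
  have hz2 : irMask (fun c => List.count c ([] : List Char)) ds = ds := by
    have : (fun c => List.count c ([] : List Char)) = (fun _ : Char => 0) := by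
      funext c; simp
    rw [this, irMask_zero]
  rw [hz1, hz2, List.nil_append] at h0
  rw [h0]
  constructor
  · rw [filter_irMask _ _ hn, irKept_eq_irKeep]
  · rw [filter_irMask _ _ hd, irKept_eq_irKeep]

-- ===== VERDICT (by name: the statement is the Claim_ definition above) =====
theorem improper_reduce_spec : Claim_equal_improper_reduce := by
  intro num den _
  unfold Spec_improper_reduce improper_reduce improper_reduce_alt
  obtain ⟨h1, h2⟩ := ir_main (PySem.Int.toChars num) (PySem.Int.toChars den)
    (toChars_no_star num) (toChars_no_star den)
  simp only [replace_star_filter, h1, h2]
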